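-- pv_equiv track=rewrite | github.com/Hunterness/Assign2-decisionTree | decisionTree.py | same_class
-- ===== SOURCE A (Python) =====
-- def same_class(examples,types):
--     nbr = []
--     for k in range(len(types)):
--         nbr.append(0)
--     for e in examples:
--         for k in range(len(types)):
--             if e[-1][1] == types[k]:
--                 nbr[k] = nbr[k] + 1
--     for k in range(len(types)):
--         if nbr[k] == len(examples):
--             return True
--     return False
-- ===== SOURCE B (Python) =====
-- def same_class(examples, types):
--     classes = {e[-1][1] for e in examples}
--     return len(classes) == 1 and next(iter(classes)) in types
-- ===== Notes on version B (the rewrite author's own statement) =====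
-- stated objective: faster
-- what changed: Replaces A's per-type count table (a nested loop over examples x types plus a final table scan) with a single pass building the set of distinct example classes followed by a cardinality check and one membership test; Pre_ excludes inputs containing an empty example, where e[-1] raises IndexError in B (and in A unless types is empty, where A accidentally skips e[-1]).
-- intended difference: On an empty examples list with nonempty types, A returns True (every zero count equals len(examples)=0, a vacuous accident of its count table) while B returns False, the intended value since there is no single shared class among zero examples. — e.g. on same_class([], ["a"]): A returns true, B returns false
-- outside the precondition, e.g. on same_class([[], [('x', 'y')]], []): A returns False, B raises IndexError
import Mathlib
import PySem

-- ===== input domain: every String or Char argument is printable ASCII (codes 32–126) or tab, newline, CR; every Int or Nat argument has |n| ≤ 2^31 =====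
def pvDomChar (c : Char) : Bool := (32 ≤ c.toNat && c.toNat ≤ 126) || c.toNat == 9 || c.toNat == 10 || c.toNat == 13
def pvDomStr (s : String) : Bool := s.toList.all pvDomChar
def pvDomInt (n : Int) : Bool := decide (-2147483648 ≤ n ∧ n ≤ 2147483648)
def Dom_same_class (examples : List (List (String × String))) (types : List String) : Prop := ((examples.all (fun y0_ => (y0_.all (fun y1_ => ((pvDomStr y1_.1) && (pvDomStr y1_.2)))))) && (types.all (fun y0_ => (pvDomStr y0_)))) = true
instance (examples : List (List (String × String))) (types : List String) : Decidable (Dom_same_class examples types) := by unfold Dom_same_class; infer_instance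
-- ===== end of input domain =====

-- B replaces A's per-type count table (nested loop over examples × types + final scan)
-- with one pass building the set of distinct example classes, then a cardinality check
-- and a single membership test (objective: faster); on an empty examples list with
-- nonempty types the two values differ (see D_ below).

-- ===== PORT A =====
def same_class (examples : List (List (String × String))) (types : List String) : Bool :=
  let nbr0 : List Int := (List.range types.length).foldl (fun a _ => a ++ [(0 : Int)]) []
  let nbr := examples.foldl (fun nbr e =>
      (List.range types.length).foldl (fun nbr k =>
        if (PySem.List.pyGetD e (-1) ("", "")).2 == types.getD k "" then
          nbr.set k (nbr.getD k 0 + 1)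
        else nbr) nbr) nbr0
  (List.range types.length).any (fun k => nbr.getD k 0 == (examples.length : Int))

-- ===== PORT B =====
def same_class_alt (examples : List (List (String × String))) (types : List String) : Bool :=
  let classes : PySem.Set String :=
    PySem.Set.ofList (examples.map (fun e => (PySem.List.pyGetD e (-1) ("", "")).2))
  match classes with
  | [c] => types.contains c       -- len(classes) == 1 and next(iter(classes)) in types
  | _ => false

-- ===== PRECONDITION & SPEC =====
-- Pre_ excludes inputs whose examples contain an empty example list: there e[-1] raises
-- IndexError in B (and in A too unless types is empty, where A accidentally skips e[-1]).
def Pre_same_class (examples : List (List (String × String))) (types : List String) : Prop :=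
  ∀ e ∈ examples, e ≠ []
instance (examples : List (List (String × String))) (types : List String) : Decidable (Pre_same_class examples types) := by unfold Pre_same_class; infer_instance

def pvWitness_same_class : (List (List (String × String))) × List String :=
  ([[("x", "yes")], [("x", "yes")]], ["yes", "no"])

-- On an empty examples list with nonempty types, A returns True (every zero count equals
-- len(examples)=0, a vacuous accident of its count table) while B returns False, the
-- intended value since there is no single shared class among zero examples.
def D_same_class (examples : List (List (String × String))) (types : List String) : Prop :=
  examples = [] ∧ types ≠ []
instance (examples : List (List (String × String))) (types : List String) : Decidable (D_same_class examples types) := by unfold D_same_class; infer_instance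

def Spec_same_class (examples : List (List (String × String))) (types : List String) (out : Bool) : Prop := ¬ D_same_class examples types → out = same_class_alt examples types
instance (examples : List (List (String × String))) (types : List String) (out : Bool) : Decidable (Spec_same_class examples types out) := by unfold Spec_same_class; infer_instance

def pvDiffWitness_same_class : (List (List (String × String))) × List String :=
  ([], ["a"])
def pvDiffWitnessOut_same_class : Bool × Bool := (true, false)

-- ===== CLAIM =====
def Claim_unchanged_same_class : Prop := ∀ (examples : List (List (String × String))) (types : List String), Dom_same_class examples types → Pre_same_class examples types → Spec_same_class examples types (same_class examples types)
def Claim_changed_same_class : Prop := Dom_same_class (pvDiffWitness_same_class.1) (pvDiffWitness_same_class.2) ∧ Pre_same_class (pvDiffWitness_same_class.1) (pvDiffWitness_same_class.2) ∧ D_same_class (pvDiffWitness_same_class.1) (pvDiffWitness_same_class.2) ∧ same_class (pvDiffWitness_same_class.1) (pvDiffWitness_same_class.2) = pvDiffWitnessOut_same_class.1 ∧ same_class_alt (pvDiffWitness_same_class.1) (pvDiffWitness_same_class.2) = pvDiffWitnessOut_same_class.2 ∧ pvDiffWitnessOut_same_class.1 ≠ pvDiffWitnessOut_same_class.2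
def Claim_exact_same_class : Prop := ∀ (examples : List (List (String × String))) (types : List String), Dom_same_class examples types → Pre_same_class examples types → D_same_class examples types → same_class examples types ≠ same_class_alt examples types

-- ===== LEMMAS AND PROOFS =====

-- "some t in types is the class of every example" — the Boolean characterisation both ports reduce to
def pvPb (examples : List (List (String × String))) (types : List String) : Bool :=
  types.any (fun t => examples.all (fun e => (PySem.List.pyGetD e (-1) ("", "")).2 == t))

lemma pvPb_eq_true_iff (examples : List (List (String × String))) (types : List String) :
    pvPb examples types = true ↔ ∃ t ∈ types, ∀ e ∈ examples, (PySem.List.pyGetD e (-1) ("", "")).2 = t := by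
  simp [pvPb]

lemma foldRange_length (p : Nat → Bool) (n : Nat) (nbr : List Int) :
    ((List.range n).foldl (fun a k => if p k then a.set k (a.getD k 0 + 1) else a) nbr).length
      = nbr.length := by
  induction n generalizing nbr with
  | zero => rfl
  | succ m ih =>
      rw [List.range_succ, List.foldl_append, List.foldl_cons, List.foldl_nil]
      split
      · rw [List.length_set]; exact ih nbr
      · exact ih nbr

lemma foldRange_getElem (p : Nat → Bool) (n : Nat) (nbr : List Int) (j : Nat) :
    ((List.range n).foldl (fun a k => if p k then a.set k (a.getD k 0 + 1) else a) nbr)[j]?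
      = if j < n ∧ p j then nbr[j]?.map (· + 1) else nbr[j]? := by
  induction n with
  | zero => simp
  | succ m ih =>
      rw [List.range_succ, List.foldl_append, List.foldl_cons, List.foldl_nil]
      by_cases hp : p m
      · rw [if_pos hp, List.getElem?_set, foldRange_length]
        by_cases hj : m = j
        · subst hj
          rw [if_pos rfl]
          have hF : ((List.range m).foldl (fun a k => if p k then a.set k (a.getD k 0 + 1) else a) nbr)[m]? = nbr[m]? := by
            rw [ih]; simp
          have hv : ((List.range m).foldl (fun a k => if p k then a.set k (a.getD k 0 + 1) else a) nbr).getD m 0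
              = nbr[m]?.getD 0 := by
            rw [List.getD_eq_getElem?_getD, hF]
          rw [hv]
          by_cases hl : m < nbr.length
          · rw [if_pos hl, if_pos ⟨Nat.lt_succ_self m, hp⟩, List.getElem?_eq_getElem hl]
            rfl
          · rw [if_neg hl, if_pos ⟨Nat.lt_succ_self m, hp⟩,
               List.getElem?_eq_none (le_of_not_gt hl)]
            rfl
        · rw [if_neg hj, ih]
          have hiff : (j < m ∧ p j) ↔ (j < m + 1 ∧ p j) := by
            constructor
            · rintro ⟨h1, h2⟩; exact ⟨by omega, h2⟩
            · rintro ⟨h1, h2⟩; exact ⟨by omega, h2⟩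
          rw [if_congr hiff rfl rfl]
      · rw [if_neg hp, ih]
        have hiff : (j < m ∧ p j) ↔ (j < m + 1 ∧ p j) := by
          constructor
          · rintro ⟨h1, h2⟩; exact ⟨by omega, h2⟩
          · rintro ⟨h1, h2⟩
            refine ⟨?_, h2⟩
            rcases Nat.lt_succ_iff_lt_or_eq.mp h1 with h | h
            · exact h
            · exact absurd h2 (h ▸ hp)
        rw [if_congr hiff rfl rfl]

lemma outerFold_getElem (examples : List (List (String × String))) (types : List String)
    (nbr : List Int) (j : Nat) :
    (examples.foldl (fun nbr e =>
        (List.range types.length).foldl (fun nbr k =>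
          if (PySem.List.pyGetD e (-1) ("", "")).2 == types.getD k "" then
            nbr.set k (nbr.getD k 0 + 1)
          else nbr) nbr) nbr)[j]?
      = if j < types.length then
          nbr[j]?.map (· + (examples.countP
            (fun e => (PySem.List.pyGetD e (-1) ("", "")).2 == types.getD j "") : Int))
        else nbr[j]? := by
  induction examples generalizing nbr with
  | nil =>
      rw [List.foldl_nil, List.countP_nil]
      split <;> simp
  | cons e es ih =>
      rw [List.foldl_cons, ih,
        foldRange_getElem (fun k => (PySem.List.pyGetD e (-1) ("", "")).2 == types.getD k "")
          types.length nbr j]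
      by_cases hj : j < types.length
      · rw [if_pos hj, if_pos hj, List.countP_cons]
        by_cases hc : (PySem.List.pyGetD e (-1) ("", "")).2 == types.getD j ""
        · rw [if_pos ⟨hj, hc⟩, hc]
          cases nbr[j]? <;> simp <;> ring
        · rw [if_neg (fun h => hc h.2), if_neg hc]
          cases nbr[j]? <;> simp
      · rw [if_neg hj, if_neg hj, if_neg (fun h => hj h.1)]

lemma init_getElem (n j : Nat) :
    (((List.range n).foldl (fun a _ => a ++ [(0 : Int)]) []) : List Int)[j]?
      = if j < n then some 0 else none := by
  have h : (List.range n).foldl (fun a (_ : Nat) => a ++ [(0 : Int)]) [] = [] ++ (List.range n).map (fun _ => (0 : Int)) :=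
    PySem.List.foldl_append_singleton_eq_map _ _ []
  rw [h, List.nil_append, List.getElem?_map]
  by_cases hj : j < n
  · rw [List.getElem?_range hj, if_pos hj]; rfl
  · rw [List.getElem?_eq_none (by simpa using le_of_not_gt hj), if_neg hj]; rfl

lemma A_char (examples : List (List (String × String))) (types : List String) :
    same_class examples types = pvPb examples types := by
  unfold same_class
  simp only []
  by_cases hP : ∃ t ∈ types, ∀ e ∈ examples, (PySem.List.pyGetD e (-1) ("", "")).2 = t
  · rw [(pvPb_eq_true_iff _ _).mpr hP, List.any_eq_true]
    rcases hP with ⟨t, ht, hall⟩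
    rcases List.getElem_of_mem ht with ⟨k, hk, hkt⟩
    refine ⟨k, List.mem_range.mpr hk, ?_⟩
    rw [List.getD_eq_getElem?_getD, outerFold_getElem, init_getElem, if_pos hk, if_pos hk]
    have hcount : examples.countP
        (fun e => (PySem.List.pyGetD e (-1) ("", "")).2 == types.getD k "") = examples.length := by
      rw [List.countP_eq_length]
      intro e he
      have h1 := hall e he
      have h2 : types.getD k "" = t := by
        rw [List.getD_eq_getElem?_getD, List.getElem?_eq_getElem hk]; exact hkt
      simp only [h1, h2, beq_self_eq_true]
    simp only [Option.map_some, Option.getD_some, zero_add, beq_iff_eq]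
    exact_mod_cast hcount
  · have hb : pvPb examples types = false :=
      Bool.eq_false_iff.mpr (fun h => hP ((pvPb_eq_true_iff _ _).mp h))
    rw [hb, List.any_eq_false]
    intro k hkm
    have hk := List.mem_range.mp hkm
    rw [List.getD_eq_getElem?_getD, outerFold_getElem, init_getElem, if_pos hk, if_pos hk]
    simp only [Option.map_some, Option.getD_some, zero_add, beq_iff_eq]
    intro hcontra
    have hcount : examples.countP
        (fun e => (PySem.List.pyGetD e (-1) ("", "")).2 == types.getD k "") = examples.length := by
      exact_mod_cast hcontra
    apply hP
    refine ⟨types.getD k "", ?_, ?_⟩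
    · rw [List.getD_eq_getElem?_getD, List.getElem?_eq_getElem hk]
      exact List.getElem_mem hk
    · intro e he
      have := List.countP_eq_length.mp hcount e he
      simpa using this

lemma ofList_eq_nil_iff {α : Type} [BEq α] [LawfulBEq α] (xs : List α) :
    PySem.Set.ofList xs = [] ↔ xs = [] := by
  constructor
  · intro h
    cases xs with
    | nil => rfl
    | cons x xs =>
        exfalso
        have hx : x ∈ PySem.Set.ofList (x :: xs) := (PySem.Set.mem_ofList _ _).mpr List.mem_cons_self
        rw [h] at hx
        exact List.not_mem_nil hx
  · intro h; subst h; rfl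

lemma B_char (examples : List (List (String × String))) (types : List String)
    (hD : ¬ (examples = [] ∧ types ≠ [])) :
    same_class_alt examples types = pvPb examples types := by
  unfold same_class_alt
  simp only []
  set cs := examples.map (fun e => (PySem.List.pyGetD e (-1) ("", "")).2) with hcs
  have hmem : ∀ x, x ∈ PySem.Set.ofList cs ↔ x ∈ cs := fun x => PySem.Set.mem_ofList cs x
  have hnodup : (PySem.Set.ofList cs).Nodup := PySem.Set.nodup_ofList cs
  have hclsmem : ∀ e ∈ examples, (PySem.List.pyGetD e (-1) ("", "")).2 ∈ cs := by
    intro e he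
    rw [hcs]
    exact List.mem_map.mpr ⟨e, he, rfl⟩
  have hcsmem : ∀ x ∈ cs, ∃ e ∈ examples, (PySem.List.pyGetD e (-1) ("", "")).2 = x := by
    intro x hx
    rw [hcs] at hx
    exact List.mem_map.mp hx
  cases hC : PySem.Set.ofList cs with
  | nil =>
      have hcsnil : cs = [] := (ofList_eq_nil_iff cs).mp hC
      have hex : examples = [] := by
        cases examples with
        | nil => rfl
        | cons e es => simp [hcs] at hcsnil
      have hty : types = [] := by
        by_contra hty
        exact hD ⟨hex, hty⟩
      subst hex; subst hty
      simp [pvPb]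
  | cons c rest =>
      cases rest with
      | nil =>
          have hc_cs : c ∈ cs := (hmem c).mp (hC ▸ List.mem_cons_self)
          have hall : ∀ x ∈ cs, x = c := by
            intro x hx
            have hx2 : x ∈ PySem.Set.ofList cs := (hmem x).mpr hx
            rw [hC] at hx2
            simpa using hx2
          by_cases hct : c ∈ types
          · have hPP : pvPb examples types = true :=
              (pvPb_eq_true_iff _ _).mpr ⟨c, hct, fun e he => hall _ (hclsmem e he)⟩
            rw [hPP]
            simpa using hct
          · have hPP : pvPb examples types = false := by
              refine Bool.eq_false_iff.mpr (fun h => ?_)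
              rcases (pvPb_eq_true_iff _ _).mp h with ⟨t, ht, hallt⟩
              rcases hcsmem c hc_cs with ⟨e, he, hev⟩
              have hc : c = t := hev ▸ hallt e he
              exact hct (hc ▸ ht)
            rw [hPP]
            simpa using hct
      | cons d rest' =>
          have hcd : c ≠ d := by
            rw [hC] at hnodup
            intro h
            exact (List.nodup_cons.mp hnodup).1 (h ▸ List.mem_cons_self)
          have hPP : pvPb examples types = false := by
            refine Bool.eq_false_iff.mpr (fun h => ?_)
            rcases (pvPb_eq_true_iff _ _).mp h with ⟨t, ht, hallt⟩
            have hc_cs : c ∈ cs := (hmem c).mp (hC ▸ List.mem_cons_self)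
            have hd_cs : d ∈ cs := (hmem d).mp (hC ▸ List.mem_cons_of_mem _ List.mem_cons_self)
            rcases hcsmem c hc_cs with ⟨e1, he1, hev1⟩
            rcases hcsmem d hd_cs with ⟨e2, he2, hev2⟩
            exact hcd ((hev1 ▸ hallt e1 he1).trans (hev2 ▸ hallt e2 he2).symm)
          rw [hPP]

-- ===== VERDICT =====
theorem same_class_spec : Claim_unchanged_same_class := by
  intro examples types _ _
  unfold Spec_same_class D_same_class
  intro hD
  rw [A_char, B_char examples types hD]

theorem same_class_changed : Claim_changed_same_class := by
  unfold Claim_changed_same_class; decide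

theorem same_class_tight : Claim_exact_same_class := by
  intro examples types _ _ hD
  rcases hD with ⟨hex, hty⟩
  subst hex
  cases types with
  | nil => exact absurd rfl hty
  | cons t ts =>
      rw [A_char]
      have hA : pvPb [] (t :: ts) = true := by simp [pvPb]
      have hB : same_class_alt [] (t :: ts) = false := rfl
      rw [hA, hB]
      decide
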